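-- pv_equiv track=rewrite | github.com/brighta/advent-of-code-python | 2024/day_04/part1.py | rotateGrid45
-- ===== SOURCE A (Python) =====
-- def rotateGrid90(grid):
--     newGrid = []
--     for j in range(len(grid[0])):
--         newRow = []
--         for i in range(len(grid)):
--             newRow.append(grid[i][j])
--         newGrid.append(newRow)
--     return newGrid
--
-- def rotateGrid45(grid):
--     newGrid = []
--     for i in range(len(grid)):
--         start = len(grid) - 1 - i
--         end = len(grid) - start - 1
--         newRow = []
--         for j in range(start):
--             newRow.append('.')
--         newRow.extend(grid[i])
--         for j in range(end):
--             newRow.append('.')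
--         newGrid.append(newRow)
--     return rotateGrid90(newGrid)
-- ===== SOURCE B (Python) =====
-- def rotateGrid45(grid):
--     n = len(grid)
--     width = n + len(grid[0]) - 1
--     out = []
--     for j in range(width):
--         row = []
--         for i in range(n):
--             c = i + j - (n - 1)
--             row.append(grid[i][c] if 0 <= c < len(grid[i]) else '.')
--         out.append(row)
--     return out
-- ===== Notes on version B (the rewrite author's own statement) =====
-- stated objective: simpler
-- what changed: B fuses A's pad-then-transpose (build a dot-padded intermediate grid, then call the rotateGrid90 transpose helper) into a single double loop that computes each output cell directly by index arithmetic c = i + j - (n-1), with no intermediate grid and no helper.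
import Mathlib
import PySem

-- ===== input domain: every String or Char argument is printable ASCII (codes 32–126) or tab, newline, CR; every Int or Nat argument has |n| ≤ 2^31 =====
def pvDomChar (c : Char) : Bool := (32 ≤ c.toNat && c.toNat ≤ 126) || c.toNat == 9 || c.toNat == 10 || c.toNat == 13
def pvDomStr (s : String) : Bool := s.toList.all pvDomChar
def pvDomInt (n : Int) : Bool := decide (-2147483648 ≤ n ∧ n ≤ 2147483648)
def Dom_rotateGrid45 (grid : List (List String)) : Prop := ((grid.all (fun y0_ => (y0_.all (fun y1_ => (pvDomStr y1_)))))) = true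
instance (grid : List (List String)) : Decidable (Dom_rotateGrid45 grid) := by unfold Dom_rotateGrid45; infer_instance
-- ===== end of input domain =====

-- B fuses A's pad-then-transpose into one double loop computing each cell by index arithmetic (objective: simpler).

-- ===== PORT A =====
def rotateGrid90 (grid : List (List String)) : List (List String) :=
  (List.range (grid.headD []).length).map (fun j =>
    (List.range grid.length).map (fun i =>
      (grid.getD i []).getD j "."))

def rotateGrid45 (grid : List (List String)) : List (List String) :=
  rotateGrid90 ((List.range grid.length).map (fun i =>
    (List.range (grid.length - 1 - i)).map (fun _ => ".")
      ++ grid.getD i []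
      ++ (List.range (grid.length - (grid.length - 1 - i) - 1)).map (fun _ => ".")))

-- ===== PORT B =====
def rotateGrid45_alt (grid : List (List String)) : List (List String) :=
  (List.range (grid.length + (grid.headD []).length - 1)).map (fun (j : Nat) =>
    (List.range grid.length).map (fun (i : Nat) =>
      let c : Int := (i : Int) + (j : Int) - ((grid.length : Int) - 1)
      if 0 ≤ c ∧ c < ((grid.getD i []).length : Int)
      then (grid.getD i []).getD c.toNat "." else "."))

-- ===== PRECONDITION & SPEC =====
-- Pre_ excludes exactly the inputs on which Python A raises IndexError: the empty grid
-- (grid[0] in rotateGrid90) and jagged grids with a row shorter than the first row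
-- (the transpose then indexes past that row's padding).
def Pre_rotateGrid45 (grid : List (List String)) : Prop :=
  grid ≠ [] ∧ ∀ row ∈ grid, (grid.headD []).length ≤ row.length
instance (grid : List (List String)) : Decidable (Pre_rotateGrid45 grid) := by
  unfold Pre_rotateGrid45; infer_instance
def pvWitness_rotateGrid45 : List (List String) := [["X", "M"], ["A", "S"]]

def Spec_rotateGrid45 (grid : List (List String)) (out : List (List String)) : Prop := out = rotateGrid45_alt grid
instance (grid : List (List String)) (out : List (List String)) : Decidable (Spec_rotateGrid45 grid out) := by unfold Spec_rotateGrid45; infer_instance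

-- ===== CLAIM (what is proved, stated in full; the proofs are below) =====
def Claim_equal_rotateGrid45 : Prop := ∀ (grid : List (List String)), Dom_rotateGrid45 grid → Pre_rotateGrid45 grid → Spec_rotateGrid45 grid (rotateGrid45 grid)

-- ===== LEMMAS AND PROOFS =====

lemma map_dot (k : Nat) : (List.range k).map (fun _ => ("." : String)) = List.replicate k "." := by
  simp

lemma getD_map_range' {α : Type} (f : Nat → α) (n i : Nat) (d : α) (hi : i < n) :
    ((List.range n).map f).getD i d = f i := by
  simp [List.getD, hi]

-- one padded cell of A's intermediate grid equals B's index-arithmetic cell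
lemma cell_eq (row : List String) (n i j : Nat) (hi : i < n) :
    (List.replicate (n - 1 - i) "." ++ row ++ List.replicate (n - (n - 1 - i) - 1) ".").getD j "."
      = (if 0 ≤ (i : Int) + (j : Int) - ((n : Int) - 1)
            ∧ (i : Int) + (j : Int) - ((n : Int) - 1) < (row.length : Int)
         then row.getD ((i : Int) + (j : Int) - ((n : Int) - 1)).toNat "." else ".") := by
  have hb : n - (n - 1 - i) - 1 = i := by omega
  rw [hb]
  set a := n - 1 - i with ha
  rcases lt_or_ge j (a + row.length) with hj | hj
  · rw [List.getD, List.getElem?_append_left (by simpa using hj)]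
    rcases lt_or_ge j a with hja | hja
    · rw [List.getElem?_append_left (by simpa using hja), if_neg (by omega)]
      simp [hja]
    · rw [List.getElem?_append_right (by simpa using hja),
        if_pos (show _ ∧ _ by constructor <;> omega)]
      have hc : ((i : Int) + (j : Int) - ((n : Int) - 1)).toNat = j - a := by omega
      rw [hc]
      simp [List.getD]
  · rw [List.getD, List.getElem?_append_right (by simpa using hj), if_neg (by omega)]
    rcases lt_or_ge (j - (a + row.length)) i with ht | ht
    · simp [ht]
    · simp [Nat.not_lt.mpr ht]

lemma ports_eq (g0 : List String) (gs : List (List String)) :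
    rotateGrid45 (g0 :: gs) = rotateGrid45_alt (g0 :: gs) := by
  unfold rotateGrid45 rotateGrid90 rotateGrid45_alt
  simp only [map_dot, List.length_map, List.length_range]
  have hn : (g0 :: gs).length = gs.length + 1 := rfl
  -- head of the padded intermediate grid
  have hhead : ((List.range ((g0 :: gs).length)).map (fun i =>
      List.replicate ((g0 :: gs).length - 1 - i) "." ++ (g0 :: gs).getD i []
        ++ List.replicate ((g0 :: gs).length - ((g0 :: gs).length - 1 - i) - 1) ".")).headD []
      = List.replicate ((g0 :: gs).length - 1) "." ++ g0
        ++ List.replicate ((g0 :: gs).length - ((g0 :: gs).length - 1) - 1) "." := by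
    rw [hn, List.range_succ_eq_map]
    simp [List.getD]
  rw [hhead]
  have hw : (List.replicate ((g0 :: gs).length - 1) "." ++ g0
      ++ List.replicate ((g0 :: gs).length - ((g0 :: gs).length - 1) - 1) ".").length
      = (g0 :: gs).length + ((g0 :: gs).headD []).length - 1 := by
    simp [hn]
  rw [hw]
  apply List.map_congr_left
  intro j hj
  apply List.map_congr_left
  intro i hi
  have hi' : i < (g0 :: gs).length := List.mem_range.mp hi
  rw [getD_map_range' _ _ _ _ hi']
  exact cell_eq ((g0 :: gs).getD i []) ((g0 :: gs).length) i j hi'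

-- ===== VERDICT (by name: the statement is the Claim_ definition above) =====
theorem rotateGrid45_spec : Claim_equal_rotateGrid45 := by
  intro grid _ hpre
  obtain ⟨g0, gs, rfl⟩ := List.exists_cons_of_ne_nil hpre.1
  exact ports_eq g0 gs
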